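-- pv_equiv track=rewrite | github.com/gasparddannet/AI_Project | plot.py | store_nas
-- ===== SOURCE A (Python) =====
-- def store_nas(data) :
--     dicoDataNas = {}
--     for i in range(len(data)) :
--         lignei = data[i]
--         date = lignei[1]+'/06/2016'
--         if date in dicoDataNas :
--             dicoDataNas[date].append(lignei)
--         else :
--             dicoDataNas[date] = [lignei]
--     return dicoDataNas
-- ===== SOURCE B (Python) =====
-- def store_nas(data):
--     # Two-pass: collect distinct date keys in first-occurrence order, then
--     # gather each group with a filtering comprehension.
--     keys = list(dict.fromkeys(line[1] + '/06/2016' for line in data))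
--     return {k: [line for line in data if line[1] + '/06/2016' == k] for k in keys}
-- ===== Notes on version B (the rewrite author's own statement) =====
-- stated objective: alternative
-- what changed: Replaces the incremental index-loop hash grouping with a two-pass decomposition: an ordered dedup of the derived date keys followed by one filtering comprehension per key.
import Mathlib
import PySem

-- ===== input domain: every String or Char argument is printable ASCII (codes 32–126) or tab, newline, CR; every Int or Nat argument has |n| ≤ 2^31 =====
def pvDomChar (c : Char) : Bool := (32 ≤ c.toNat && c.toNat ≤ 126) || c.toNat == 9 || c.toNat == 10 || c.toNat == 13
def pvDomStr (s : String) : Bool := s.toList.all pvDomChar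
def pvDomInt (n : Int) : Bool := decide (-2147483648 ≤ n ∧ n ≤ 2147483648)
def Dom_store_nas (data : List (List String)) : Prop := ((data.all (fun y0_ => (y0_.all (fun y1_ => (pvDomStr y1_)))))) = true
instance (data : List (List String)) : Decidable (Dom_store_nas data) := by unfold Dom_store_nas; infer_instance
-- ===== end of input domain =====

-- B groups rows by date key via ordered key-dedup plus per-key filtering instead of A's
-- incremental dict building; same return value on every input where A returns.

-- ===== PORT A =====
def store_nas (data : List (List String)) : List (String × List (List String)) :=
  ((PySem.List.pyRange 0 (PySem.List.len data) 1).foldl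
    (fun (d : PySem.Dict String (List (List String))) i =>
      let lignei := PySem.List.pyGetD data i []
      let date := (PySem.List.pyGet? lignei 1).getD "" ++ "/06/2016"   -- lignei[1]: in range under Pre_
      if d.contains date then
        d.modify date [] (· ++ [lignei])          -- dicoDataNas[date].append(lignei)
      else
        d.insert date [lignei])
    PySem.Dict.empty).items

-- ===== PORT B =====
def rowKey (line : List String) : String :=
  (PySem.List.pyGet? line 1).getD "" ++ "/06/2016"   -- line[1]: in range under Pre_

def store_nas_alt (data : List (List String)) : List (String × List (List String)) :=
  let keys := PySem.List.dedup (data.map rowKey)             -- list(dict.fromkeys(...))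
  keys.map (fun k => (k, data.filter (fun line => rowKey line == k)))  -- dict comprehension over distinct keys

-- ===== PRECONDITION & SPEC =====
-- Pre_ excludes inputs where some row has fewer than 2 entries: there Python A (and B) raise IndexError on line[1].
def Pre_store_nas (data : List (List String)) : Prop := ∀ l ∈ data, 2 ≤ l.length
instance (data : List (List String)) : Decidable (Pre_store_nas data) := by unfold Pre_store_nas; infer_instance
def pvWitness_store_nas : List (List String) := [["x", "1"], ["y", "2"], ["z", "1"]]

def Spec_store_nas (data : List (List String)) (out : List (String × List (List String))) : Prop := out = store_nas_alt data
instance (data : List (List String)) (out : List (String × List (List String))) : Decidable (Spec_store_nas data out) := by unfold Spec_store_nas; infer_instance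

-- ===== CLAIM (what is proved, stated in full; the proofs are below) =====
def Claim_equal_store_nas : Prop := ∀ (data : List (List String)), Dom_store_nas data → Pre_store_nas data → Spec_store_nas data (store_nas data)

-- ===== LEMMAS AND PROOFS =====

-- A's loop body is exactly a 'modify' step: a missing key appends (k, [] ++ [l]) = (k, [l]).
theorem step_eq_modify (d : PySem.Dict String (List (List String))) (k : String) (l : List String) :
    (if d.contains k then d.modify k [] (· ++ [l]) else d.insert k [l]) = d.modify k [] (· ++ [l]) := by
  by_cases h : d.contains k = true
  · simp [h]
  · simp only [Bool.not_eq_true] at h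
    simp [h, PySem.Dict.modify, PySem.Dict.getD_of_not_contains d [] h]

-- A's dict as a fold of modifies over the rows themselves.
theorem store_nas_eq_fold (data : List (List String)) :
    store_nas data =
      (data.foldl (fun (d : PySem.Dict String (List (List String))) l =>
        d.modify (rowKey l) [] (· ++ [l])) PySem.Dict.empty).items := by
  have hf : (fun (d : PySem.Dict String (List (List String))) (i : Int) =>
        let lignei := PySem.List.pyGetD data i []
        let date := (PySem.List.pyGet? lignei 1).getD "" ++ "/06/2016"
        if d.contains date then d.modify date [] (· ++ [lignei])
        else d.insert date [lignei])
      = (fun (d : PySem.Dict String (List (List String))) (i : Int) =>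
          (fun (d : PySem.Dict String (List (List String))) (l : List String) =>
            d.modify (rowKey l) [] (· ++ [l])) d (PySem.List.pyGetD data i [])) := by
    funext d i
    exact step_eq_modify d (rowKey (PySem.List.pyGetD data i [])) (PySem.List.pyGetD data i [])
  have h2 := PySem.List.foldl_pyRange_pyGetD data []
    (fun (d : PySem.Dict String (List (List String))) (l : List String) =>
      d.modify (rowKey l) [] (· ++ [l])) PySem.Dict.empty (a := 0) (by norm_num)
  simp only [Int.toNat_zero, List.drop_zero] at h2
  unfold store_nas
  rw [hf, h2]

-- The grouped dict's lookup is the filter of the rows with that key.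
theorem getD_fold (data : List (List String)) (c : String) :
    (data.foldl (fun (d : PySem.Dict String (List (List String))) l =>
        d.modify (rowKey l) [] (· ++ [l])) PySem.Dict.empty).getD c []
      = data.filter (fun line => rowKey line == c) := by
  have h : (data.foldl (fun (d : PySem.Dict String (List (List String))) l =>
        d.modify (rowKey l) [] (· ++ [l])) PySem.Dict.empty)
      = ((data.map (fun r => (rowKey r, r))).foldl
          (fun (d : PySem.Dict String (List (List String))) p =>
            d.modify p.1 [] (· ++ [p.2])) PySem.Dict.empty) := by
    rw [List.foldl_map]
  rw [h, PySem.Dict.getD_foldl_modify_append, List.filter_map]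
  simp [Function.comp_def]

-- ===== VERDICT (by name: the statement is the Claim_ definition above) =====
theorem store_nas_spec : Claim_equal_store_nas := by
  intro data _ _
  unfold Spec_store_nas store_nas_alt
  rw [store_nas_eq_fold]
  rw [PySem.Dict.items_eq_map_keys _
    (PySem.Dict.nodup_keys_foldl_modify_key data rowKey [] (fun _ l => (· ++ [l]))
      PySem.Dict.empty PySem.Dict.nodup_keys_empty) []]
  rw [PySem.Dict.keys_foldl_modify_key data rowKey [] (fun _ l => (· ++ [l])) PySem.Dict.empty]
  have hk : PySem.Set.update (PySem.Dict.keys (PySem.Dict.empty : PySem.Dict String (List (List String)))) (data.map rowKey)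
      = PySem.List.dedup (data.map rowKey) := by
    rw [PySem.List.dedup_eq_ofList]
    rfl
  rw [hk]
  exact List.map_congr_left (fun k _ => by rw [getD_fold])
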